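-- pv_equiv track=rewrite | github.com/j-luo93/MorphForest | py/utils.py | update_memory
-- ===== SOURCE A (Python) =====
-- import heapq
--
-- def update_memory(entry, memory, beam_size):
--     assert len(memory) <= beam_size
--     heapq.heappush(memory, entry)
--     if len(memory) > beam_size:
--         new_memory = list()
--         while len(new_memory) < beam_size:
--             heapq.heappush(new_memory, heapq.heappop(memory))
--         memory = new_memory
--     return memory
-- ===== SOURCE B (Python) =====
-- import heapq
--
-- def update_memory(entry, memory, beam_size):
--     assert len(memory) <= beam_size
--     heapq.heappush(memory, entry)
--     if len(memory) > beam_size: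
--         memory = sorted(memory)[:beam_size]
--     return memory
-- ===== Notes on version B (the rewrite author's own statement) =====
-- stated objective: simpler
-- what changed: A's overflow handling rebuilds the beam by repeatedly heappop-ing the smallest element and heappush-ing it into a fresh heap; B instead sorts the overflowing heap once and slices off the beam_size smallest.
-- outside the precondition, e.g. on update_memory(0, [1, 0, 0], 3): A returns [0, 1, 0], B returns [0, 0, 0]; on update_memory(5, [3, 1], 1): A raises AssertionError, B raises AssertionError
import Mathlib
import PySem

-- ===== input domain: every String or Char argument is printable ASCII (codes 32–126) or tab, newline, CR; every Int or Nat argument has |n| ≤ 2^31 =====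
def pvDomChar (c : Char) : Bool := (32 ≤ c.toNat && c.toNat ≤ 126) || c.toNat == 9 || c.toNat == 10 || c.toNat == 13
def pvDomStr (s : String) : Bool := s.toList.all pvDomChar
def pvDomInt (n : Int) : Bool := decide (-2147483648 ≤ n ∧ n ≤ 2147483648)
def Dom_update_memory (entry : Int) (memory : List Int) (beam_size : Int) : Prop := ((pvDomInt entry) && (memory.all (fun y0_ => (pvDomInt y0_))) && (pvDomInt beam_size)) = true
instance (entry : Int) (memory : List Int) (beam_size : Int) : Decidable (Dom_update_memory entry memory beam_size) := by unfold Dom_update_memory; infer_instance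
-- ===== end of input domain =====

-- B replaces A's pop-and-repush heap rebuild loop by sorting the overflowing heap and slicing off the
-- beam_size smallest; equivalence is about the RETURN value only (the Python A mutates `memory` in place).

-- ===== PORT A =====
-- hand port of heapq._siftdown (bubble the appended item up towards the root); the fuel argument
-- (callers pass fuel = pos; pos strictly decreases towards startpos = 0) only makes the recursion
-- structural: with that fuel, exhaustion coincides with Python's loop exit pos = startpos
def siftdownGo : Nat → List Int → Int → Nat → Nat → List Int
  | 0, h, newitem, _, pos => h.set pos newitem
  | fuel + 1, h, newitem, startpos, pos =>
    if pos > startpos then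
      let parentpos := (pos - 1) / 2
      let parent := h.getD parentpos 0
      if newitem < parent then
        siftdownGo fuel (h.set pos parent) newitem startpos parentpos
      else h.set pos newitem
    else h.set pos newitem
-- hand port of heapq.heappush: append, then _siftdown(heap, 0, len(heap)-1)
def heappush (h : List Int) (item : Int) : List Int :=
  siftdownGo h.length (h ++ [item]) item 0 h.length
-- hand port of heapq._siftup (move the hole down to a leaf choosing the smaller child, then
-- _siftdown); fuel = h.length - pos: childpos > pos each step, so with that fuel exhaustion
-- coincides with Python's loop exit childpos ≥ len(heap)
def siftupGo : Nat → List Int → Int → Nat → Nat → List Int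
  | 0, h, newitem, startpos, pos => siftdownGo pos (h.set pos newitem) newitem startpos pos
  | fuel + 1, h, newitem, startpos, pos =>
    if 2 * pos + 1 < h.length then
      let childpos := if 2 * pos + 2 < h.length ∧ ¬ (h.getD (2 * pos + 1) 0 < h.getD (2 * pos + 2) 0)
                      then 2 * pos + 2 else 2 * pos + 1
      siftupGo fuel (h.set pos (h.getD childpos 0)) newitem startpos childpos
    else
      siftdownGo pos (h.set pos newitem) newitem startpos pos
def siftup (h : List Int) (pos : Nat) : List Int :=
  siftupGo h.length h (h.getD pos 0) pos pos
def heappop (h : List Int) : Option (Int × List Int) :=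
  match h with
  | [] => none
  | x :: xs =>
    let lastelt := (x :: xs).getLast (List.cons_ne_nil x xs)
    match (x :: xs).dropLast with
    | [] => some (lastelt, [])
    | y :: ys => some (y, siftup ((y :: ys).set 0 lastelt) 0)
-- A's while-loop (while len(new_memory) < beam_size: heappush(new_memory, heappop(memory)));
-- fuel = beam_size.toNat: new_memory grows by one per iteration, so with that fuel exhaustion
-- coincides with the loop test len(new_memory) < beam_size turning false
def heapLoop : Nat → Int → List Int → List Int → List Int
  | 0, _, _, acc => acc
  | fuel + 1, beam_size, mem, acc =>
    if (acc.length : Int) < beam_size then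
      match heappop mem with
      | none => acc   -- Python raises IndexError here; unreachable under Pre_
      | some (v, mem') => heapLoop fuel beam_size mem' (heappush acc v)
    else acc
def update_memory (entry : Int) (memory : List Int) (beam_size : Int) : List Int :=
  let m := heappush memory entry
  if (m.length : Int) > beam_size then heapLoop beam_size.toNat beam_size m [] else m

-- ===== PORT B =====
def update_memory_alt (entry : Int) (memory : List Int) (beam_size : Int) : List Int :=
  let m := heappush memory entry
  if (m.length : Int) > beam_size then
    PySem.List.slice (PySem.List.sorted m (fun x => x) false) none (some beam_size)
  else m

-- ===== PRECONDITION & SPEC =====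
-- Pre_ excludes inputs with len(memory) > beam_size (A's assert raises AssertionError) and non-heap
-- memory lists, on which heapq's pop order is an accidental artefact of the violated heap invariant
-- that every caller of this function maintains.
def Pre_update_memory (entry : Int) (memory : List Int) (beam_size : Int) : Prop :=
  (memory.length : Int) ≤ beam_size ∧
  ∀ j, j < memory.length → 0 < j → memory.getD ((j - 1) / 2) 0 ≤ memory.getD j 0
instance (entry : Int) (memory : List Int) (beam_size : Int) : Decidable (Pre_update_memory entry memory beam_size) := by
  unfold Pre_update_memory; infer_instance

def pvWitness_update_memory : Int × List Int × Int := (2, [1, 3], 2)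

def Spec_update_memory (entry : Int) (memory : List Int) (beam_size : Int) (out : List Int) : Prop := out = update_memory_alt entry memory beam_size
instance (entry : Int) (memory : List Int) (beam_size : Int) (out : List Int) : Decidable (Spec_update_memory entry memory beam_size out) := by unfold Spec_update_memory; infer_instance

-- ===== CLAIM (what is proved, stated in full; the proofs are below) =====
def Claim_equal_update_memory : Prop := ∀ (entry : Int) (memory : List Int) (beam_size : Int), Dom_update_memory entry memory beam_size → Pre_update_memory entry memory beam_size → Spec_update_memory entry memory beam_size (update_memory entry memory beam_size)

-- ===== LEMMAS AND PROOFS =====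

def IsHeap (h : List Int) : Prop :=
  ∀ j, j < h.length → 0 < j → h.getD ((j - 1) / 2) 0 ≤ h.getD j 0
theorem getD_set_ne (l : List Int) (i j : Nat) (a : Int) (hne : j ≠ i) :
    (l.set i a).getD j 0 = l.getD j 0 := by
  simp [List.getD_eq_getElem?_getD, List.getElem?_set_ne (Ne.symm hne)]
theorem getD_set_self (l : List Int) (i : Nat) (a : Int) (hi : i < l.length) :
    (l.set i a).getD i 0 = a := by
  simp [List.getD_eq_getElem?_getD, hi]
theorem getD_mem (l : List Int) (j : Nat) (hj : j < l.length) : l.getD j 0 ∈ l := by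
  simp [List.getD_eq_getElem?_getD, List.getElem?_eq_getElem hj]
theorem getD_append_lt (l : List Int) (x : Int) (j : Nat) (hj : j < l.length) :
    (l ++ [x]).getD j 0 = l.getD j 0 := by
  simp [List.getD_eq_getElem?_getD, List.getElem?_append_left hj]
theorem getD_dropLast (l : List Int) (i : Nat) (hi : i < l.length - 1) :
    l.dropLast.getD i 0 = l.getD i 0 := by
  simp [List.getD_eq_getElem?_getD, hi, List.getElem?_eq_getElem (show i < l.length by omega)]
theorem set_append_last (l : List Int) (a b : Int) :
    (l ++ [a]).set l.length b = l ++ [b] := by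
  rw [show l.length = l.length + 0 from rfl, List.set_append_right _ _ (by omega)]
  simp
theorem count_set (l : List Int) (i : Nat) (hi : i < l.length) (a b : Int) :
    (l.set i a).count b + (if l.getD i 0 = b then 1 else 0)
      = l.count b + (if a = b then 1 else 0) := by
  rw [List.set_eq_take_cons_drop a hi]
  conv_rhs => rw [show l = l.take i ++ l[i] :: l.drop (i+1) by
    rw [← List.set_eq_take_cons_drop l[i] hi]; simp]
  have : l.getD i 0 = l[i] := by simp [List.getD_eq_getElem?_getD, List.getElem?_eq_getElem hi]
  rw [this]
  simp only [List.count_append, List.count_cons]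
  split_ifs <;> simp_all <;> omega
theorem perm_set_set (l : List Int) (i j : Nat) (hi : i < l.length) (hj : j < l.length)
    (hij : i ≠ j) (x : Int) :
    List.Perm ((l.set i (l.getD j 0)).set j x) (l.set i x) := by
  rw [List.perm_iff_count]; intro b
  have h1 := count_set (l.set i (l.getD j 0)) j (by simpa using hj) x b
  rw [getD_set_ne l i j _ (Ne.symm hij)] at h1
  have h2 := count_set l i hi (l.getD j 0) b
  have h3 := count_set l i hi x b
  split_ifs at h1 h2 h3 <;> omega
theorem siftdownGo_step_pos (fuel : Nat) (h : List Int) (x : Int) (pos : Nat) (hp : 0 < pos) :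
    siftdownGo (fuel + 1) h x 0 pos =
      if x < h.getD ((pos - 1) / 2) 0 then
        siftdownGo fuel (h.set pos (h.getD ((pos - 1) / 2) 0)) x 0 ((pos - 1) / 2)
      else h.set pos x := by
  simp [siftdownGo, hp]
theorem siftdownGo_zero (fuel : Nat) (h : List Int) (x : Int) :
    siftdownGo fuel h x 0 0 = h.set 0 x := by
  cases fuel <;> simp [siftdownGo]
theorem siftdown_set_heap (x : Int) (h : List Int)
    (hpos : 0 < h.length)
    (hA : ∀ j, j < h.length → 0 < j → j ≠ 0 → (j - 1) / 2 ≠ 0 →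
          h.getD ((j - 1) / 2) 0 ≤ h.getD j 0)
    (hB : ∀ c, c < h.length → (c - 1) / 2 = 0 → c ≠ 0 → x ≤ h.getD c 0) :
    IsHeap (h.set 0 x) := by
  intro j hj hj0
  simp only [List.length_set] at hj
  have hjne : j ≠ 0 := by omega
  by_cases hjpar : (j - 1) / 2 = 0
  · rw [getD_set_ne h 0 j _ hjne, hjpar, getD_set_self h 0 _ hpos]
    exact hB j hj hjpar hjne
  · rw [getD_set_ne h 0 j _ hjne, getD_set_ne h 0 _ _ hjpar]
    exact hA j hj hj0 hjne hjpar
theorem siftdownGo_spec (fuel : Nat) (x : Int) (pos : Nat) (h : List Int)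
    (hf : pos ≤ fuel) (hpos : pos < h.length)
    (hA : ∀ j, j < h.length → 0 < j → j ≠ pos → (j - 1) / 2 ≠ pos →
          h.getD ((j - 1) / 2) 0 ≤ h.getD j 0)
    (hB : ∀ c, c < h.length → (c - 1) / 2 = pos → c ≠ pos → x ≤ h.getD c 0)
    (hC : ∀ c, c < h.length → (c - 1) / 2 = pos → c ≠ pos → 0 < pos →
          h.getD ((pos - 1) / 2) 0 ≤ h.getD c 0) :
    IsHeap (siftdownGo fuel h x 0 pos) ∧ List.Perm (siftdownGo fuel h x 0 pos) (h.set pos x) := by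
  induction fuel generalizing h pos with
  | zero =>
    have hz : pos = 0 := by omega
    subst hz
    rw [siftdownGo_zero]
    exact ⟨siftdown_set_heap x h hpos hA hB, List.Perm.refl _⟩
  | succ fuel IH =>
  by_cases hp0 : 0 < pos
  · have hplt : (pos - 1) / 2 < pos := by
      have := Nat.div_le_self (pos - 1) 2; omega
    rw [siftdownGo_step_pos fuel h x pos hp0]
    by_cases hcmp : x < h.getD ((pos - 1) / 2) 0
    · rw [if_pos hcmp]
      set p := (pos - 1) / 2 with hpdef
      have hplen : p < h.length := lt_trans hplt hpos
      obtain ⟨hh, hperm⟩ := IH p (h.set pos (h.getD p 0)) (by omega)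
        (by simpa using hplen)
        (by -- hA'
          intro j hj hj0 hjp hjpar
          simp only [List.length_set] at hj
          by_cases hjpos : j = pos
          · exact absurd (by omega : (j - 1) / 2 = p) hjpar
          · by_cases hjparpos : (j - 1) / 2 = pos
            · rw [getD_set_ne h pos j _ hjpos, hjparpos, getD_set_self h pos _ hpos]
              exact hC j hj hjparpos hjpos hp0
            · rw [getD_set_ne h pos j _ hjpos, getD_set_ne h pos _ _ hjparpos]
              exact hA j hj hj0 hjpos hjparpos)
        (by -- hB'
          intro c hc hcp hcne
          simp only [List.length_set] at hc
          by_cases hcpos : c = pos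
          · rw [hcpos, getD_set_self h pos _ hpos]; exact le_of_lt hcmp
          · rw [getD_set_ne h pos c _ hcpos]
            have hc0 : 0 < c := by omega
            have : h.getD ((c - 1) / 2) 0 ≤ h.getD c 0 :=
              hA c hc hc0 hcpos (by omega)
            rw [hcp] at this
            exact le_trans (le_of_lt hcmp) this
          )
        (by -- hC'
          intro c hc hcp hcne hpp0
          simp only [List.length_set] at hc
          have hppne : (p - 1) / 2 ≠ pos := by
            have := Nat.div_le_self (p - 1) 2; omega
          rw [getD_set_ne h pos _ _ hppne]
          have hbase : h.getD ((p - 1) / 2) 0 ≤ h.getD p 0 :=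
            hA p hplen hpp0 (by omega) hppne
          by_cases hcpos : c = pos
          · rw [hcpos, getD_set_self h pos _ hpos]; exact hbase
          · rw [getD_set_ne h pos c _ hcpos]
            have hc0 : 0 < c := by omega
            have : h.getD ((c - 1) / 2) 0 ≤ h.getD c 0 :=
              hA c hc hc0 hcpos (by omega)
            rw [hcp] at this
            exact le_trans hbase this)
      exact ⟨hh, hperm.trans (perm_set_set h pos p hpos hplen (by omega) x)⟩
    · rw [if_neg hcmp]
      refine ⟨?_, List.Perm.refl _⟩
      intro j hj hj0
      simp only [List.length_set] at hj
      by_cases hjpos : j = pos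
      · have hpne : (pos - 1) / 2 ≠ pos := by
          have := Nat.div_le_self (pos - 1) 2; omega
        rw [hjpos, getD_set_ne h pos _ _ hpne, getD_set_self h pos _ hpos]
        exact le_of_not_gt hcmp
      · by_cases hjpar : (j - 1) / 2 = pos
        · rw [getD_set_ne h pos j _ hjpos, hjpar, getD_set_self h pos _ hpos]
          exact hB j hj hjpar hjpos
        · rw [getD_set_ne h pos j _ hjpos, getD_set_ne h pos _ _ hjpar]
          exact hA j hj hj0 hjpos hjpar
  · have hz : pos = 0 := by omega
    subst hz
    rw [siftdownGo_zero]
    exact ⟨siftdown_set_heap x h hpos hA hB, List.Perm.refl _⟩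
theorem siftupGo_leaf (fuel : Nat) (h : List Int) (x : Int) (s pos : Nat)
    (hc : ¬ 2 * pos + 1 < h.length) :
    siftupGo fuel h x s pos = siftdownGo pos (h.set pos x) x s pos := by
  cases fuel <;> simp [siftupGo, hc]
theorem siftupGo_step (fuel : Nat) (h : List Int) (x : Int) (s pos : Nat)
    (hc : 2 * pos + 1 < h.length) :
    siftupGo (fuel + 1) h x s pos =
      (let c := if 2 * pos + 2 < h.length ∧ ¬ (h.getD (2 * pos + 1) 0 < h.getD (2 * pos + 2) 0)
                then 2 * pos + 2 else 2 * pos + 1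
       siftupGo fuel (h.set pos (h.getD c 0)) x s c) := by
  simp [siftupGo, hc]
theorem siftup_leaf_spec (x : Int) (pos : Nat) (h : List Int)
    (hpos : pos < h.length) (hc : ¬ 2 * pos + 1 < h.length)
    (hA : ∀ j, j < h.length → 0 < j → j ≠ pos → (j - 1) / 2 ≠ pos →
          h.getD ((j - 1) / 2) 0 ≤ h.getD j 0) :
    IsHeap (siftdownGo pos (h.set pos x) x 0 pos) ∧
      List.Perm (siftdownGo pos (h.set pos x) x 0 pos) (h.set pos x) := by
  obtain ⟨hh, hperm⟩ := siftdownGo_spec pos x pos (h.set pos x) (le_refl pos)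
    (by simpa using hpos)
    (by intro j hj hj0 hjpos hjpar
        simp only [List.length_set] at hj
        rw [getD_set_ne h pos j _ hjpos, getD_set_ne h pos _ _ hjpar]
        exact hA j hj hj0 hjpos hjpar)
    (by intro d hd hdpar hdne
        simp only [List.length_set] at hd
        omega)
    (by intro d hd hdpar hdne _
        simp only [List.length_set] at hd
        omega)
  refine ⟨hh, hperm.trans ?_⟩
  rw [List.set_set]
theorem siftupGo_spec (fuel : Nat) : ∀ (x : Int) (pos : Nat) (h : List Int),
    h.length ≤ fuel + pos → pos < h.length →
    (∀ j, j < h.length → 0 < j → j ≠ pos → (j - 1) / 2 ≠ pos →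
          h.getD ((j - 1) / 2) 0 ≤ h.getD j 0) →
    (∀ c, c < h.length → (c - 1) / 2 = pos → c ≠ pos → 0 < pos →
          h.getD ((pos - 1) / 2) 0 ≤ h.getD c 0) →
    IsHeap (siftupGo fuel h x 0 pos) ∧ List.Perm (siftupGo fuel h x 0 pos) (h.set pos x) := by
  induction fuel with
  | zero =>
    intro x pos h hn hpos hA hC
    rw [siftupGo_leaf 0 h x 0 pos (by omega)]
    exact siftup_leaf_spec x pos h hpos (by omega) hA
  | succ fuel IH =>
  intro x pos h hn hpos hA hC
  by_cases hc : 2 * pos + 1 < h.length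
  · rw [siftupGo_step fuel h x 0 pos hc]
    set c := if 2 * pos + 2 < h.length ∧ ¬ (h.getD (2 * pos + 1) 0 < h.getD (2 * pos + 2) 0)
             then 2 * pos + 2 else 2 * pos + 1 with hcdef
    have key : (2 * pos + 1 ≤ c ∧ c ≤ 2 * pos + 2 ∧ c < h.length) ∧
        ∀ j, j < h.length → 0 < j → (j - 1) / 2 = pos → j ≠ c →
          h.getD c 0 ≤ h.getD j 0 := by
      by_cases hsp : 2 * pos + 2 < h.length ∧ ¬ (h.getD (2 * pos + 1) 0 < h.getD (2 * pos + 2) 0)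
      · have hcval : c = 2 * pos + 2 := by rw [hcdef, if_pos hsp]
        refine ⟨⟨by rw [hcval]; omega, by rw [hcval], by rw [hcval]; exact hsp.1⟩, ?_⟩
        intro j hj hj0 hjpar hjc
        rw [hcval] at hjc ⊢
        have hj1 : j = 2 * pos + 1 := by omega
        rw [hj1]; exact le_of_not_gt hsp.2
      · have hcval : c = 2 * pos + 1 := by rw [hcdef, if_neg hsp]
        refine ⟨⟨by rw [hcval], by rw [hcval]; omega, by rw [hcval]; exact hc⟩, ?_⟩
        intro j hj hj0 hjpar hjc
        rw [hcval] at hjc ⊢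
        have hj2 : j = 2 * pos + 2 := by omega
        rw [hj2]
        rcases not_and_or.mp hsp with hlen | hlt
        · exact absurd (by omega : 2 * pos + 2 < h.length) hlen
        · exact le_of_lt (not_not.mp hlt)
    obtain ⟨⟨hcl, hcu, hclen⟩, hsmall⟩ := key
    have hcpar : (c - 1) / 2 = pos := by omega
    have hcgt : pos < c := by omega
    obtain ⟨hh, hperm⟩ := IH x c (h.set pos (h.getD c 0))
      (by simp; omega) (by simpa using hclen)
      (by -- hA'
        intro j hj hj0 hjc hjparc
        simp only [List.length_set] at hj
        by_cases hjpos : j = pos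
        · subst hjpos
          have hparne : (j - 1) / 2 ≠ j := by
            have := Nat.div_le_self (j - 1) 2; omega
          rw [getD_set_ne h j _ _ hparne, getD_set_self h j _ hpos]
          exact hC c hclen hcpar (by omega) (by omega)
        · by_cases hjpar : (j - 1) / 2 = pos
          · rw [getD_set_ne h pos j _ hjpos, hjpar, getD_set_self h pos _ hpos]
            exact hsmall j hj hj0 hjpar hjc
          · rw [getD_set_ne h pos j _ hjpos, getD_set_ne h pos _ _ hjpar]
            exact hA j hj hj0 hjpos hjpar)
      (by -- hC'
        intro g hg hgpar hgc _
        simp only [List.length_set] at hg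
        have hgpos : g ≠ pos := by omega
        rw [hcpar, getD_set_self h pos _ hpos, getD_set_ne h pos g _ hgpos]
        have hgparne : (g - 1) / 2 ≠ pos := by omega
        have := hA g hg (by omega) hgpos hgparne
        rw [hgpar] at this
        exact this)
    refine ⟨hh, hperm.trans ?_⟩
    exact perm_set_set h pos c hpos hclen (by omega) x
  · rw [siftupGo_leaf (fuel + 1) h x 0 pos hc]
    exact siftup_leaf_spec x pos h hpos hc hA
theorem isHeap_root_le (h : List Int) (hh : IsHeap h) :
    ∀ j, j < h.length → h.getD 0 0 ≤ h.getD j 0 := by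
  intro j
  induction j using Nat.strong_induction_on with
  | _ j IH =>
  intro hj
  by_cases hj0 : j = 0
  · rw [hj0]
  · have hpar : (j - 1) / 2 < j := by
      have := Nat.div_le_self (j - 1) 2; omega
    exact le_trans (IH _ hpar (by omega)) (hh j hj (by omega))
theorem isHeap_root_min (h : List Int) (hh : IsHeap h) :
    ∀ b ∈ h, h.getD 0 0 ≤ b := by
  intro b hb
  obtain ⟨i, hi, rfl⟩ := List.mem_iff_getElem.mp hb
  have : h.getD i 0 = h[i] := by
    simp [List.getD_eq_getElem?_getD, List.getElem?_eq_getElem hi]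
  rw [← this]
  exact isHeap_root_le h hh i hi
theorem heappush_spec (h : List Int) (x : Int) (hh : IsHeap h) :
    IsHeap (heappush h x) ∧ List.Perm (heappush h x) (x :: h) := by
  unfold heappush
  obtain ⟨hheap, hperm⟩ := siftdownGo_spec h.length x h.length (h ++ [x]) (le_refl _)
    (by simp)
    (by intro j hj hj0 hjn hjpar
        simp only [List.length_append, List.length_cons, List.length_nil] at hj
        have hjlt : j < h.length := by omega
        have hparlt : (j - 1) / 2 < h.length := by
          have := Nat.div_le_self (j - 1) 2; omega
        rw [getD_append_lt h x j hjlt, getD_append_lt h x _ hparlt]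
        exact hh j hjlt hj0)
    (by intro c hc hcp hcn
        simp only [List.length_append, List.length_cons, List.length_nil] at hc
        omega)
    (by intro c hc hcp hcn _
        simp only [List.length_append, List.length_cons, List.length_nil] at hc
        omega)
  refine ⟨hheap, hperm.trans ?_⟩
  rw [set_append_last]
  exact List.perm_append_singleton x h
theorem heappush_of_le (acc : List Int) (v : Int) (hub : ∀ a ∈ acc, a ≤ v) :
    heappush acc v = acc ++ [v] := by
  unfold heappush
  rcases Nat.eq_zero_or_pos acc.length with hz | hpos
  · rw [hz, siftdownGo_zero]
    have : acc = [] := List.eq_nil_of_length_eq_zero hz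
    subst this; rfl
  · obtain ⟨k, hk⟩ : ∃ k, acc.length = k + 1 := ⟨acc.length - 1, by omega⟩
    rw [hk, siftdownGo_step_pos _ _ _ _ (by omega)]
    have hplt : (k + 1 - 1) / 2 < acc.length := by
      have := Nat.div_le_self k 2; omega
    rw [getD_append_lt acc v _ hplt, if_neg (not_lt.mpr (hub _ (getD_mem acc _ hplt))),
        ← hk, set_append_last]
theorem heappop_spec (h : List Int) (hh : IsHeap h) (hne : h ≠ []) :
    ∃ h', heappop h = some (h.getD 0 0, h') ∧ IsHeap h' ∧ List.Perm (h.getD 0 0 :: h') h := by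
  match h with
  | [x] =>
    refine ⟨[], by simp [heappop], ?_, by simp⟩
    intro j hj hj0; simp at hj
  | x :: z :: zs =>
    have hdl : (x :: z :: zs).dropLast = x :: (z :: zs).dropLast := by simp
    have hlast : (x :: z :: zs).getLast (List.cons_ne_nil _ _) = (z :: zs).getLast (by simp) := by simp
    set lastelt := (z :: zs).getLast (by simp) with hle
    have hpop : heappop (x :: z :: zs)
        = some (x, siftup ((x :: (z :: zs).dropLast).set 0 lastelt) 0) := by
      simp only [heappop, hdl, hlast]
    set m0 := (x :: (z :: zs).dropLast).set 0 lastelt with hm0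
    have hm0c : m0 = lastelt :: (z :: zs).dropLast := by rw [hm0]; rfl
    have hm0len : m0.length = zs.length + 1 := by simp [hm0c]
    have hm0get : ∀ k, 0 < k → k < m0.length → m0.getD k 0 = (x :: z :: zs).getD k 0 := by
      intro k hk0 hklen
      rw [hm0c]
      match k, hk0 with
      | Nat.succ k', _ =>
        show ((z :: zs).dropLast).getD k' 0 = _
        have : ((z :: zs).dropLast).getD k' 0 = (z :: zs).getD k' 0 := by
          apply getD_dropLast
          simp at hm0len ⊢
          simp [hm0c] at hklen
          omega
        rw [this]; rfl
    obtain ⟨hheap, hperm⟩ := siftupGo_spec m0.length lastelt 0 m0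
      (by omega) (by simp [hm0c])
      (by intro j hj hj0 hjne hjpar
          rw [hm0get j hj0 hj, hm0get _ (by omega) (by
            have := Nat.div_le_self (j - 1) 2; omega)]
          exact hh j (by simp at hj ⊢; simp [hm0c] at hj; omega) hj0)
      (by intro c hc hcp hcn h0; omega)
    refine ⟨siftup m0 0, ?_, ?_, ?_⟩
    · rw [hpop]; rfl
    · exact hheap
    · have hgd : (x :: z :: zs).getD 0 0 = x := rfl
      rw [hgd]
      have h1 : List.Perm (siftup m0 0) m0 := by
        have : m0.set 0 (m0.getD 0 0) = m0 := by rw [hm0c]; rfl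
        unfold siftup
        calc List.Perm (siftupGo m0.length m0 (m0.getD 0 0) 0 0) (m0.set 0 (m0.getD 0 0)) := hperm
          _ = m0 := this
      refine List.Perm.trans (List.Perm.cons x h1) ?_
      rw [hm0c]
      refine List.Perm.cons x ?_
      have := List.dropLast_concat_getLast (l := z :: zs) (by simp)
      calc List.Perm (lastelt :: (z :: zs).dropLast) ((z :: zs).dropLast ++ [lastelt]) :=
            (List.perm_append_singleton _ _).symm
        _ = z :: zs := this
theorem sorted_cons_of_min (h h' : List Int) (v : Int)
    (hperm : List.Perm (v :: h') h) (hmin : ∀ b ∈ h', v ≤ b) :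
    PySem.List.sorted h (fun x => x) false = v :: PySem.List.sorted h' (fun x => x) false := by
  apply PySem.List.eq_of_perm_of_pairwise_le
  · exact (PySem.List.sorted_perm h _ _).trans
      (hperm.symm.trans (List.Perm.cons v (PySem.List.sorted_perm h' _ _).symm))
  · simpa using PySem.List.sorted_pairwise (xs := h) (key := fun x => x)
  · refine List.Pairwise.cons ?_ (by simpa using PySem.List.sorted_pairwise (xs := h') (key := fun x => x))
    intro b hb
    exact hmin b ((PySem.List.mem_sorted _ _ _ _).mp hb)
theorem heapLoop_eq (beam : Int) (fuel : Nat) : ∀ (mem acc : List Int),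
    IsHeap mem → beam ≤ (acc.length : Int) + mem.length →
    beam.toNat ≤ fuel + acc.length →
    (∀ a ∈ acc, ∀ b ∈ mem, a ≤ b) →
    heapLoop fuel beam mem acc
      = acc ++ (PySem.List.sorted mem (fun x => x) false).take (beam.toNat - acc.length) := by
  induction fuel with
  | zero =>
    intro mem acc hh hle hfuel hba
    have : beam.toNat - acc.length = 0 := by omega
    rw [this]
    simp [heapLoop]
  | succ fuel IH =>
  intro mem acc hh hle hfuel hba
  rw [show heapLoop (fuel + 1) beam mem acc
      = (if (acc.length : Int) < beam then
          (match heappop mem with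
           | none => acc
           | some (v, mem') => heapLoop fuel beam mem' (heappush acc v))
         else acc) from rfl]
  by_cases hlt : (acc.length : Int) < beam
  · rw [if_pos hlt]
    have hmemne : mem ≠ [] := by
      intro hnil; rw [hnil] at hle; simp at hle; omega
    obtain ⟨mem', hpop, hh', hperm⟩ := heappop_spec mem hh hmemne
    rw [hpop]
    show heapLoop fuel beam mem' (heappush acc (mem.getD 0 0)) = _
    have hlen' : mem'.length + 1 = mem.length := by
      have := hperm.length_eq; simpa using this
    have hvmem : mem.getD 0 0 ∈ mem := getD_mem mem 0 (by omega)
    have hmin' : ∀ b ∈ mem', mem.getD 0 0 ≤ b := by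
      intro b hb
      exact isHeap_root_min mem hh b (hperm.mem_iff.mp (List.mem_cons_of_mem _ hb))
    rw [heappush_of_le acc _ (fun a ha => hba a ha _ hvmem)]
    rw [IH mem' (acc ++ [mem.getD 0 0]) hh'
      (by simp; omega) (by simp; omega)
      (by intro a ha b hb
          rcases List.mem_append.mp ha with h1 | h2
          · exact hba a h1 b (hperm.mem_iff.mp (List.mem_cons_of_mem _ hb))
          · simp at h2; rw [h2]; exact hmin' b hb)]
    rw [sorted_cons_of_min mem mem' _ hperm hmin']
    have hsplit : beam.toNat - acc.length = (beam.toNat - (acc.length + 1)) + 1 := by omega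
    rw [hsplit, List.take_succ_cons]
    simp
  · rw [if_neg hlt]
    have : beam.toNat - acc.length = 0 := by omega
    rw [this]
    simp

-- ===== VERDICT (by name: the statement is the Claim_ definition above) =====
theorem update_memory_spec : Claim_equal_update_memory := by
  intro entry memory beam_size _dom hpre
  obtain ⟨hlen, hheap⟩ := hpre
  show update_memory entry memory beam_size = update_memory_alt entry memory beam_size
  have hheap' : IsHeap memory := hheap

  obtain ⟨hph, hpp⟩ := heappush_spec memory entry hheap
  have hplen : (heappush memory entry).length = memory.length + 1 := by
    simpa using hpp.length_eq
  have hb0 : 0 ≤ beam_size := le_trans (Int.natCast_nonneg _) hlen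
  show (if ((heappush memory entry).length : Int) > beam_size then heapLoop beam_size.toNat beam_size (heappush memory entry) [] else heappush memory entry)
     = (if ((heappush memory entry).length : Int) > beam_size then
          PySem.List.slice (PySem.List.sorted (heappush memory entry) (fun x => x) false) none (some beam_size)
        else heappush memory entry)
  by_cases hover : ((heappush memory entry).length : Int) > beam_size
  · rw [if_pos hover, if_pos hover]
    have hslice : PySem.List.slice (PySem.List.sorted (heappush memory entry) (fun x => x) false) none (some beam_size)
        = (PySem.List.sorted (heappush memory entry) (fun x => x) false).take beam_size.toNat := by
      conv_lhs => rw [show beam_size = ((beam_size.toNat : Nat) : Int) by omega]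
      rw [PySem.List.slice_to_natCast]
    rw [hslice, heapLoop_eq beam_size beam_size.toNat (heappush memory entry) [] hph
      (by simp; omega) (by simp)
      (by intro a ha; simp at ha)]
    simp
  · rw [if_neg hover, if_neg hover]
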